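-- pv_equiv track=rewrite | github.com/adricosta01/YARRRML-parser-orthoXML | funcionesAuxiliares.py | dividir_cadenas
-- ===== SOURCE A (Python) =====
-- def dividir_cadenas(cadena1, cadena2):
--     segmentos1 = cadena1.split('/')
--     segmentos2 = cadena2.split('/')
--
--     comun = []
--     resto1 = []
--     resto2 = []
--
--     for seg1, seg2 in zip(segmentos1, segmentos2):
--         if seg1 == seg2:
--             comun.append(seg1)
--         else:
--             resto1 = segmentos1[segmentos1.index(seg1):]
--             resto2 = segmentos2[segmentos2.index(seg2):]
--             break
--     comun = "/".join(comun)
--     resto1 = "/".join(resto1)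
--     resto2 = "/".join(resto2)
--
--     return comun, resto1, resto2
-- ===== SOURCE B (Python) =====
-- def dividir_cadenas(cadena1, cadena2):
--     segmentos1 = cadena1.split('/')
--     segmentos2 = cadena2.split('/')
--     n = min(len(segmentos1), len(segmentos2))
--     k = 0
--     while k < n and segmentos1[k] == segmentos2[k]:
--         k += 1
--     comun = "/".join(segmentos1[:k])
--     if k < n:
--         return comun, "/".join(segmentos1[k:]), "/".join(segmentos2[k:])
--     return comun, "", ""
-- ===== Notes on version B (the rewrite author's own statement) =====
-- stated objective: simpler
-- what changed: B replaces A's accumulate-and-break zip loop (with its list.index re-scan) by a find-the-divergence-index scan followed by direct slicing: comun = join of the first k segments and the remainders are the slices from k, so the index() re-scan disappears.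
-- intended difference: On inputs where the paths diverge at position k and the segment at k also occurs among the first k (common) segments, A's list.index finds the earlier duplicate and returns a remainder that overlaps the common prefix (e.g. A('a/b/a/x','a/b/c/x') = ('a/b','a/b/a/x','c/x')), while B returns the true remainders from the divergence point ('a/b','a/x','c/x'), which is the intended split of the paths. — e.g. on dividir_cadenas("a/b/a/x", "a/b/c/x"): A returns ("a/b", "a/b/a/x", "c/x"), B returns ("a/b", "a/x", "c/x")
import Mathlib
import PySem

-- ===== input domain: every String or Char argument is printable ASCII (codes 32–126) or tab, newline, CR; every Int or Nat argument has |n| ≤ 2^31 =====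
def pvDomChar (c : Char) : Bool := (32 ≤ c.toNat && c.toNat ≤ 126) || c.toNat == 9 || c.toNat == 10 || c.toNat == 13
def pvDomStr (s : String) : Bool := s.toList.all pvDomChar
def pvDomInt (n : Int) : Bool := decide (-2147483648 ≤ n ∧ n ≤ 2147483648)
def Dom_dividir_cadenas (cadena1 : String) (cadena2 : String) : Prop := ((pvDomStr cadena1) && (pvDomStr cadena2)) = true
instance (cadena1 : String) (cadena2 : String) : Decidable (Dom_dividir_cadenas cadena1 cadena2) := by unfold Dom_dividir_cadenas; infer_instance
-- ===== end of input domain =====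

-- B replaces A's accumulate-and-break loop (with its list.index re-scan) by "find the divergence
-- index, then slice"; on duplicate-segment corners (see D_) B returns the intended remainders.

-- ===== PORT A =====

-- the `for seg1, seg2 in zip(...)` loop with its break; s1 s2 are the full lists used by .index;
-- the accumulator is `comun`.  seg1/seg2 come from the zip of s1,s2 so list.index cannot raise:
-- index? is always `some` here and .getD 0 never fires.
def pvLoopA (s1 s2 : List String) : List (String × String) → List String →
    List String × List String × List String
  | [], comun => (comun, [], [])
  | (seg1, seg2) :: rest, comun =>
    if seg1 == seg2 then pvLoopA s1 s2 rest (comun ++ [seg1])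
    else (comun, s1.drop ((PySem.List.index? s1 seg1).getD 0),
                 s2.drop ((PySem.List.index? s2 seg2).getD 0))

def dividir_cadenas (cadena1 : String) (cadena2 : String) : String × String × String :=
  let segmentos1 := (PySem.Str.split? cadena1 "/").getD []   -- sep "/" ≠ "": split? is always `some`
  let segmentos2 := (PySem.Str.split? cadena2 "/").getD []
  let r := pvLoopA segmentos1 segmentos2 (segmentos1.zip segmentos2) []
  (PySem.Str.join "/" r.1, PySem.Str.join "/" r.2.1, PySem.Str.join "/" r.2.2)

-- ===== PORT B =====
-- the `while k < n and segmentos1[k] == segmentos2[k]: k += 1` scan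
def pvFindK : List String → List String → Nat
  | a :: xs, b :: ys => if a == b then pvFindK xs ys + 1 else 0
  | _, _ => 0

def dividir_cadenas_alt (cadena1 : String) (cadena2 : String) : String × String × String :=
  let segmentos1 := (PySem.Str.split? cadena1 "/").getD []   -- sep "/" ≠ "": split? is always `some`
  let segmentos2 := (PySem.Str.split? cadena2 "/").getD []
  let k := pvFindK segmentos1 segmentos2
  let comun := PySem.Str.join "/" (segmentos1.take k)
  if k < min segmentos1.length segmentos2.length then
    (comun, PySem.Str.join "/" (segmentos1.drop k), PySem.Str.join "/" (segmentos2.drop k))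
  else (comun, "", "")

-- ===== PRECONDITION & SPEC =====
-- On inputs where the paths diverge at position k and the segment at k also occurs among the first
-- k (common) segments, A's list.index finds the earlier duplicate and returns a remainder that
-- overlaps the common prefix, while B returns the true remainders from the divergence point,
-- which is the intended split of the paths.
-- the '/'-segment decomposition of the input (used only to state D_, not by the ports)
def pvSegs (s : String) : List String := (PySem.Chars.splitOn s.toList ['/']).map String.ofList
def D_dividir_cadenas (cadena1 : String) (cadena2 : String) : Prop :=
  let s := pvSegs cadena1
  let t := pvSegs cadena2
  ∃ k < min s.length t.length, s.take k = t.take k ∧ s.getD k "" ≠ t.getD k "" ∧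
    (s.getD k "" ∈ s.take k ∨ t.getD k "" ∈ t.take k)
instance (cadena1 : String) (cadena2 : String) : Decidable (D_dividir_cadenas cadena1 cadena2) := by
  unfold D_dividir_cadenas; infer_instance

def Spec_dividir_cadenas (cadena1 : String) (cadena2 : String) (out : String × String × String) : Prop :=
  ¬ D_dividir_cadenas cadena1 cadena2 → out = dividir_cadenas_alt cadena1 cadena2
instance (cadena1 : String) (cadena2 : String) (out : String × String × String) : Decidable (Spec_dividir_cadenas cadena1 cadena2 out) := by unfold Spec_dividir_cadenas; infer_instance

def pvDiffWitness_dividir_cadenas : String × String := ("a/b/a/x", "a/b/c/x")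
def pvDiffWitnessOut_dividir_cadenas : (String × String × String) × (String × String × String) :=
  (("a/b", "a/b/a/x", "c/x"), ("a/b", "a/x", "c/x"))

-- ===== CLAIM (what is proved, stated in full; the proofs are below) =====
def Claim_unchanged_dividir_cadenas : Prop := ∀ (cadena1 : String) (cadena2 : String), Dom_dividir_cadenas cadena1 cadena2 → Spec_dividir_cadenas cadena1 cadena2 (dividir_cadenas cadena1 cadena2)
def Claim_changed_dividir_cadenas : Prop := Dom_dividir_cadenas (pvDiffWitness_dividir_cadenas.1) (pvDiffWitness_dividir_cadenas.2) ∧ D_dividir_cadenas (pvDiffWitness_dividir_cadenas.1) (pvDiffWitness_dividir_cadenas.2) ∧ dividir_cadenas (pvDiffWitness_dividir_cadenas.1) (pvDiffWitness_dividir_cadenas.2) = pvDiffWitnessOut_dividir_cadenas.1 ∧ dividir_cadenas_alt (pvDiffWitness_dividir_cadenas.1) (pvDiffWitness_dividir_cadenas.2) = pvDiffWitnessOut_dividir_cadenas.2 ∧ pvDiffWitnessOut_dividir_cadenas.1 ≠ pvDiffWitnessOut_dividir_cadenas.2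

-- ===== LEMMAS AND PROOFS =====

lemma pvFindK_take_eq (l1 l2 : List String) :
    l1.take (pvFindK l1 l2) = l2.take (pvFindK l1 l2) := by
  induction l1 generalizing l2 with
  | nil => simp [pvFindK]
  | cons a xs ih =>
    cases l2 with
    | nil => simp [pvFindK]
    | cons b ys =>
      by_cases h : a = b
      · simp [pvFindK, h, ih ys]
      · simp [pvFindK, h]

lemma pvFindK_ne (l1 l2 : List String)
    (hk : pvFindK l1 l2 < min l1.length l2.length) :
    l1.getD (pvFindK l1 l2) "" ≠ l2.getD (pvFindK l1 l2) "" := by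
  induction l1 generalizing l2 with
  | nil => simp at hk
  | cons a xs ih =>
    cases l2 with
    | nil => simp at hk
    | cons b ys =>
      by_cases h : a = b
      · have := ih ys (by simpa [pvFindK, h, Nat.succ_lt_succ_iff] using hk)
        simpa [pvFindK, h] using this
      · simp [pvFindK, h]

-- characterization of A's break-loop run on the zip, for any full lists s1 s2 and accumulator
lemma pvLoopA_zip (s1 s2 : List String) (l1 l2 acc : List String) :
    pvLoopA s1 s2 (l1.zip l2) acc =
      if pvFindK l1 l2 < min l1.length l2.length then
        (acc ++ l1.take (pvFindK l1 l2),
         s1.drop ((PySem.List.index? s1 (l1.getD (pvFindK l1 l2) "")).getD 0),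
         s2.drop ((PySem.List.index? s2 (l2.getD (pvFindK l1 l2) "")).getD 0))
      else (acc ++ l1.take (pvFindK l1 l2), [], []) := by
  induction l1 generalizing l2 acc with
  | nil => simp [pvFindK, pvLoopA]
  | cons a xs ih =>
    cases l2 with
    | nil => simp [pvFindK, pvLoopA]
    | cons b ys =>
      by_cases h : a = b
      · subst h
        have hz : (a :: xs).zip (a :: ys) = (a, a) :: xs.zip ys := rfl
        have hstep : pvLoopA s1 s2 ((a, a) :: xs.zip ys) acc
            = pvLoopA s1 s2 (xs.zip ys) (acc ++ [a]) := by simp [pvLoopA]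
        rw [hz, hstep, ih ys (acc ++ [a])]
        by_cases hlt : pvFindK xs ys < min xs.length ys.length
        · simp [pvFindK, hlt, Nat.lt_min.mp hlt]
        · have := Nat.lt_min.not.mp hlt
          simp [pvFindK, hlt]
          omega
      · have hz : (a :: xs).zip (b :: ys) = (a, b) :: xs.zip ys := rfl
        rw [hz]
        simp [pvLoopA, pvFindK, h]

-- first fresh occurrence: index? finds position k
lemma index?_of_not_mem_take (xs : List String) (k : Nat) (hk : k < xs.length)
    (hnm : xs.getD k "" ∉ xs.take k) :
    PySem.List.index? xs (xs.getD k "") = some k := by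
  rw [PySem.List.index?_eq_some_iff]
  refine ⟨xs.take k, xs.drop (k + 1), ?_, by simp [Nat.le_of_lt hk], hnm⟩
  have h1 : xs.getD k "" = xs[k] := by simp [List.getD_eq_getElem?_getD, hk]
  rw [h1]
  conv_lhs => rw [← List.take_append_drop k xs]
  rw [List.getElem_cons_drop hk]

-- ===== VERDICT (by name: the statement is the Claim_ definition above) =====
theorem dividir_cadenas_spec : Claim_unchanged_dividir_cadenas := by
  intro c1 c2 _
  unfold Spec_dividir_cadenas
  intro hnd
  unfold dividir_cadenas dividir_cadenas_alt
  dsimp only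
  have e1 : pvSegs c1 = (PySem.Str.split? c1 "/").getD [] := by
    simp [pvSegs, PySem.Str.split?, PySem.Chars.split?]
  have e2 : pvSegs c2 = (PySem.Str.split? c2 "/").getD [] := by
    simp [pvSegs, PySem.Str.split?, PySem.Chars.split?]
  set s1 := (PySem.Str.split? c1 "/").getD [] with hs1
  set s2 := (PySem.Str.split? c2 "/").getD [] with hs2
  rw [pvLoopA_zip]
  by_cases hlt : pvFindK s1 s2 < min s1.length s2.length
  · have hne := pvFindK_ne s1 s2 hlt
    have heq := pvFindK_take_eq s1 s2
    unfold D_dividir_cadenas at hnd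
    dsimp only at hnd
    rw [e1, e2] at hnd
    push Not at hnd
    have hmem := hnd (pvFindK s1 s2) hlt heq hne
    have hk1 : pvFindK s1 s2 < s1.length := lt_of_lt_of_le hlt (Nat.min_le_left _ _)
    have hk2 : pvFindK s1 s2 < s2.length := lt_of_lt_of_le hlt (Nat.min_le_right _ _)
    rw [index?_of_not_mem_take s1 _ hk1 hmem.1, index?_of_not_mem_take s2 _ hk2 hmem.2]
    simp [hlt]
  · simp [hlt, PySem.Str.join]

theorem dividir_cadenas_changed : Claim_changed_dividir_cadenas := by
  unfold Claim_changed_dividir_cadenas; decide
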